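-- pv_equiv track=rewrite | github.com/lssl4/SampleProjects | Python/Project1 - Parsing Votes/project1.py | parsePaper
-- ===== SOURCE A (Python) =====
-- def parseVote(s):
--     vote = 0
--     if s.strip().isdigit():
--         vote = int(s)
--     elif s.strip() == "":
--         vote = 0
--     else:
--         vote = -1
--     return vote
--
-- def parsePaper(s,n):
--     numberList = s.split(",")
--     message = ""
--     parseVoteList = []
--     countOfZeroes = 0
--     if len(numberList) > n: #if the lenght of list is greater than number of candidates.
--         message = "too long"
--     else:
--         for item in numberList:
--             parseVoteList.append(parseVote(item))
--         for element in parseVoteList: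
--             if element == -1:
--                 parseVoteList = []
--                 message = "non-digits"
--             if element == 0:
--                 countOfZeroes = countOfZeroes +1
--                 if countOfZeroes == len(parseVoteList):
--                     parseVoteList = []
--                     message = "blank"
--     return parseVoteList, message
-- ===== SOURCE B (Python) =====
-- def parsePaper(s, n):
--     # single character-level scan: no split(), no per-token parser
--     votes = []
--     saw_bad = False   # some field is invalid (-1)
--     saw_pos = False   # some field has a positive vote
--     digits = []       # digit characters of the current field
--     gap = False       # whitespace has been seen after a digit in this field
--     bad = False       # current field cannot be a (whitespace-padded) digit string
--     for c in s + ",":          # sentinel comma terminates the last field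
--         if c == ",":
--             if bad:
--                 vote = -1
--             elif digits:
--                 vote = int("".join(digits))
--             else:
--                 vote = 0
--             votes.append(vote)
--             saw_bad = saw_bad or vote == -1
--             saw_pos = saw_pos or vote > 0
--             digits = []
--             gap = False
--             bad = False
--         elif c.isspace():
--             if digits:
--                 gap = True
--         elif "0" <= c <= "9":
--             if gap:
--                 bad = True
--             else:
--                 digits.append(c)
--         else:
--             bad = True
--     if len(votes) > n:
--         return [], "too long"
--     if saw_bad:
--         return [], "non-digits"
--     if not saw_pos:
--         return [], "blank"
--     return votes, ""
-- ===== Notes on version B (the rewrite author's own statement) =====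
-- stated objective: alternative
-- what changed: A splits the string on commas, parses each token with parseVote (strip/isdigit/int), then validates with a stateful loop over the vote list; B never splits and has no per-token parser: it runs a single character-level DFA over the string (with a sentinel comma) that accumulates each field's digit characters and whitespace/garbage flags, flushing a vote and aggregate flags at every comma.
import Mathlib
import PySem

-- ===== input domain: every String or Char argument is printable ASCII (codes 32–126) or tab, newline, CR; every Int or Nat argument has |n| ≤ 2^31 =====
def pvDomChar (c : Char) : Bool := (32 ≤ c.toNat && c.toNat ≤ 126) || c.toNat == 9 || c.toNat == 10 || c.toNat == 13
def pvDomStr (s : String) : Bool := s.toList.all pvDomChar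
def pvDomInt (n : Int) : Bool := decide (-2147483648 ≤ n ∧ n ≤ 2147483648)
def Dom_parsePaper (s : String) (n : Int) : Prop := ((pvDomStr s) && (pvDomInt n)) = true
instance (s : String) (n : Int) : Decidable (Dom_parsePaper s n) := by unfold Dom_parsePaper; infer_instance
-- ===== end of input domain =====

-- B replaces A's split + per-token parseVote + stateful validation loop by a single character-level
-- DFA over the string (sentinel comma) that flushes one vote and aggregate flags per field; objective: alternative.


-- ===== PORT A =====
-- int(s) under s.strip().isdigit() never raises, so the .getD 0 default is unreachable.
def pvParseVote (cs : List Char) : Int :=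
  if PySem.Chars.strIsdigit (PySem.Chars.strip cs) then (PySem.Int.ofChars? cs).getD 0
  else if PySem.Chars.strip cs = [] then 0
  else -1

-- the body of A's second for-loop, state = (parseVoteList, message, countOfZeroes)
def pvLoopA (st : List Int × String × Int) (element : Int) : List Int × String × Int :=
  let lst := st.1
  let msg := st.2.1
  let cz := st.2.2
  let lst' := if element = -1 then ([] : List Int) else lst
  let msg' := if element = -1 then "non-digits" else msg
  if element = 0 then
    let cz' := cz + 1
    if cz' = (lst'.length : Int) then ([], "blank", cz')
    else (lst', msg', cz')
  else (lst', msg', cz)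

def parsePaper (s : String) (n : Int) : List Int × String :=
  let numberList := PySem.Chars.splitOn s.toList [',']
  if (numberList.length : Int) > n then ([], "too long")
  else
    let pv := numberList.foldl (fun acc item => acc ++ [pvParseVote item]) []
    let st := pv.foldl pvLoopA (pv, "", 0)
    (st.1, st.2.1)

-- ===== PORT B =====
-- B's loop state: votes so far, aggregate flags, and the current field's DFA state
-- (collected digit chars, 'whitespace seen after a digit' flag, 'field invalid' flag).
structure PvSt where
  votes : List Int
  sawBad : Bool
  sawPos : Bool
  digits : List Char
  gap : Bool
  bad : Bool
deriving DecidableEq, Repr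

-- the flush at a comma: the current field's vote (int("".join(digits)) never raises on all-digit digits)
def pvFlush (st : PvSt) : Int :=
  if st.bad then -1
  else if st.digits.isEmpty then 0
  else (PySem.Int.ofChars? st.digits).getD 0

-- one character step of Source B's loop
def pvStepB (st : PvSt) (c : Char) : PvSt :=
  if c = ',' then
    let v := pvFlush st
    ⟨st.votes ++ [v], st.sawBad || (v == -1), st.sawPos || decide (0 < v), [], false, false⟩
  else if PySem.Chars.isspace c then
    (if st.digits.isEmpty then st else { st with gap := true })
  else if '0' ≤ c ∧ c ≤ '9' then
    (if st.gap then { st with bad := true } else { st with digits := st.digits ++ [c] })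
  else { st with bad := true }

def parsePaper_alt (s : String) (n : Int) : List Int × String :=
  let st := (s.toList ++ [',']).foldl pvStepB ⟨[], false, false, [], false, false⟩
  if (st.votes.length : Int) > n then ([], "too long")
  else if st.sawBad then ([], "non-digits")
  else if !st.sawPos then ([], "blank")
  else (st.votes, "")

-- ===== PRECONDITION & SPEC =====
def Spec_parsePaper (s : String) (n : Int) (out : List Int × String) : Prop := out = parsePaper_alt s n
instance (s : String) (n : Int) (out : List Int × String) : Decidable (Spec_parsePaper s n out) := by unfold Spec_parsePaper; infer_instance

-- ===== CLAIM (what is proved, stated in full; the proofs are below) =====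
def Claim_equal_parsePaper : Prop := ∀ (s : String) (n : Int), Dom_parsePaper s n → Spec_parsePaper s n (parsePaper s n)

-- ===== LEMMAS AND PROOFS =====

-- ---- a structural recurrence for splitOn on a single-char separator ----
def pvSplit : List Char → List (List Char)
  | [] => [[]]
  | c :: r =>
    if c = ',' then [] :: pvSplit r
    else
      match pvSplit r with
      | [] => [[c]]
      | t :: ts => (c :: t) :: ts

theorem pvSplit_ne_nil (cs : List Char) : pvSplit cs ≠ [] := by
  cases cs with
  | nil => simp [pvSplit]
  | cons c r =>
    simp only [pvSplit]
    split
    · simp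
    · split <;> simp

theorem pvSplitOn_go_spec : ∀ (fuel : Nat) (l cur : List Char) (acc : List (List Char)),
    l.length < fuel →
    PySem.Chars.splitOn.go [','] fuel l cur acc =
      acc.reverse ++ (match pvSplit l with
        | [] => []
        | t :: ts => (cur.reverse ++ t) :: ts) := by
  intro fuel
  induction fuel with
  | zero => intro l cur acc h; omega
  | succ fuel ih =>
    intro l cur acc h
    cases l with
    | nil =>
      rw [PySem.Chars.splitOn.go]
      simp [pvSplit]
      omega
    | cons c rest =>
      rw [PySem.Chars.splitOn.go]
      by_cases hc : c = ','
      · subst hc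
        have hpre : [','].isPrefixOf (',' :: rest) = true := by simp [List.isPrefixOf]
        rw [if_pos hpre]
        have h' : rest.length < fuel := by simp at h; omega
        rw [ih _ _ _ (by simpa using h')]
        rcases hr : pvSplit rest with _ | ⟨t, ts⟩
        · exact absurd hr (pvSplit_ne_nil rest)
        · simp [pvSplit, hr]
      · have hpre : [','].isPrefixOf (c :: rest) = false := by
          simp only [List.isPrefixOf, Bool.and_true, beq_eq_false_iff_ne, ne_eq]
          exact fun h => hc h.symm
        rw [if_neg (by simp [hpre])]
        have h' : rest.length < fuel := by simp at h; omega
        rw [ih _ _ _ h']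
        rcases hr : pvSplit rest with _ | ⟨t, ts⟩
        · exact absurd hr (pvSplit_ne_nil rest)
        · simp [pvSplit, hr, hc]

theorem pvSplitOn_eq (cs : List Char) : PySem.Chars.splitOn cs [','] = pvSplit cs := by
  unfold PySem.Chars.splitOn
  rw [pvSplitOn_go_spec _ _ _ _ (by omega)]
  rcases hr : pvSplit cs with _ | ⟨t, ts⟩
  · exact absurd hr (pvSplit_ne_nil cs)
  · simp

-- ---- the per-field DFA (the non-comma part of pvStepB on the last three components) ----
def pvStep3 (t : List Char × Bool × Bool) (c : Char) : List Char × Bool × Bool :=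
  if PySem.Chars.isspace c then (if t.1.isEmpty then t else (t.1, true, t.2.2))
  else if '0' ≤ c ∧ c ≤ '9' then
    (if t.2.1 then (t.1, t.2.1, true) else (t.1 ++ [c], t.2.1, t.2.2))
  else (t.1, t.2.1, true)

def pvRun3 (p : List Char) : List Char × Bool × Bool := p.foldl pvStep3 ([], false, false)

theorem pvStepB_non_comma (v : List Int) (sb sp : Bool) (d : List Char) (g b : Bool)
    (c : Char) (hc : c ≠ ',') :
    pvStepB ⟨v, sb, sp, d, g, b⟩ c =
      ⟨v, sb, sp, (pvStep3 (d, g, b) c).1, (pvStep3 (d, g, b) c).2.1, (pvStep3 (d, g, b) c).2.2⟩ := by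
  simp only [pvStepB, pvStep3, hc, if_false]
  split
  · split <;> rfl
  · split
    · split <;> rfl
    · rfl

-- ---- DFA invariant: relates pvRun3 p to strip p ----
def pvGood (p d : List Char) (g : Bool) : Prop :=
  ∃ w1 w2, p = w1 ++ d ++ w2 ∧ (∀ c ∈ w1, PySem.Chars.isspace c) ∧
    (∀ c ∈ w2, PySem.Chars.isspace c) ∧ (∀ c ∈ d, PySem.Chars.isdigit c) ∧
    (d = [] → w2 = []) ∧ (g = true ↔ (d ≠ [] ∧ w2 ≠ []))

def pvInv3 (p : List Char) : Prop :=
  if (pvRun3 p).2.2 then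
    PySem.Chars.strip p ≠ [] ∧ (PySem.Chars.strip p).all PySem.Chars.isdigit = false
  else pvGood p (pvRun3 p).1 (pvRun3 p).2.1

-- ---- character classification facts ----
theorem pv_char_of_toNat {c : Char} {n : Nat} (h : c.toNat = n) (d : Char) (hd : d.toNat = n) :
    c = d := by
  apply Char.ext
  apply UInt32.toNat_inj.mp
  show c.toNat = d.toNat
  rw [h, hd]

theorem pv_isdigit_toNat {c : Char} (h : PySem.Chars.isdigit c = true) :
    48 ≤ c.toNat ∧ c.toNat ≤ 57 := by
  simp [PySem.Chars.isdigit] at h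
  obtain ⟨h1, h2⟩ := h
  rw [Char.le_def] at h1 h2
  exact ⟨h1, h2⟩

theorem pv_isdigit_not_isspace {c : Char} (h : PySem.Chars.isdigit c = true) :
    PySem.Chars.isspace c = false := by
  obtain ⟨h1, h2⟩ := pv_isdigit_toNat h
  simp only [PySem.Chars.isspace]
  simp only [Bool.or_eq_false_iff, Bool.and_eq_false_iff, decide_eq_false_iff_not]
  omega

theorem pv_isdigit_not_intspace {c : Char} (h : PySem.Chars.isdigit c = true) :
    PySem.Int.isIntSpace c = false := by
  obtain ⟨h1, h2⟩ := pv_isdigit_toNat h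
  simp only [PySem.Int.isIntSpace, Bool.or_eq_false_iff, decide_eq_false_iff_not]
  refine ⟨⟨⟨⟨⟨?_, ?_⟩, ?_⟩, ?_⟩, ?_⟩, ?_⟩ <;> intro he <;> subst he <;> simp [Char.toNat] at h1 h2

-- ---- strip / int-core facts ----
theorem pv_dropWhile_all {p : Char → Bool} {w l : List Char} (hw : ∀ c ∈ w, p c = true) :
    List.dropWhile p (w ++ l) = List.dropWhile p l := by
  induction w with
  | nil => rfl
  | cons c w ih =>
    simp only [List.cons_append, List.dropWhile_cons, hw c (by simp), if_pos]
    exact ih (fun c hc => hw c (by simp [hc]))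

theorem pv_dropWhile_head_false {p : Char → Bool} {c : Char} {l : List Char} (hc : p c = false) :
    List.dropWhile p (c :: l) = c :: l := by
  simp [hc]

-- generic two-sided trim of a "spaces ++ body ++ spaces" sandwich
theorem pv_core_sandwich_gen (p : Char → Bool) (w1 d w2 : List Char)
    (hw1 : ∀ c ∈ w1, p c = true) (hw2 : ∀ c ∈ w2, p c = true) (hd : d ≠ [])
    (hdd : ∀ c ∈ d, p c = false) :
    (List.dropWhile p (List.dropWhile p (w1 ++ d ++ w2)).reverse).reverse = d := by
  obtain ⟨c, d', rfl⟩ := List.exists_cons_of_ne_nil hd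
  rw [List.append_assoc, pv_dropWhile_all hw1, List.cons_append,
      pv_dropWhile_head_false (hdd c (by simp))]
  rw [show (c :: (d' ++ w2)).reverse = w2.reverse ++ (c :: d').reverse by simp]
  rw [pv_dropWhile_all (fun x hx => hw2 x (by simpa using hx))]
  rcases hlast : (c :: d').reverse with _ | ⟨y, ys⟩
  · simp at hlast
  · have hy : y ∈ c :: d' := by
      have : y ∈ (c :: d').reverse := by simp [hlast]
      exact (List.mem_reverse).1 this
    rw [pv_dropWhile_head_false (hdd y hy)]
    rw [← hlast, List.reverse_reverse]

theorem pv_strip_sandwich (w1 d w2 : List Char) (hw1 : ∀ c ∈ w1, PySem.Chars.isspace c = true)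
    (hw2 : ∀ c ∈ w2, PySem.Chars.isspace c = true) (hd : d ≠ [])
    (hdd : ∀ c ∈ d, PySem.Chars.isdigit c = true) :
    PySem.Chars.strip (w1 ++ d ++ w2) = d := by
  unfold PySem.Chars.strip PySem.Chars.lstrip PySem.Chars.rstrip
  exact pv_core_sandwich_gen _ w1 d w2 hw1 hw2 hd
    (fun c hc => pv_isdigit_not_isspace (hdd c hc))

theorem pv_strip_all_space (w : List Char) (hw : ∀ c ∈ w, PySem.Chars.isspace c = true) :
    PySem.Chars.strip w = [] := by
  unfold PySem.Chars.strip PySem.Chars.lstrip PySem.Chars.rstrip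
  rw [show w = w ++ [] by simp, pv_dropWhile_all hw]
  simp

theorem pv_mem_strip {c : Char} {p : List Char} (hc : c ∈ p)
    (hs : PySem.Chars.isspace c = false) : c ∈ PySem.Chars.strip p := by
  unfold PySem.Chars.strip PySem.Chars.lstrip PySem.Chars.rstrip
  have step : ∀ (l : List Char), c ∈ l → c ∈ List.dropWhile PySem.Chars.isspace l := by
    intro l hl
    rcases List.mem_append.1 (by rw [List.takeWhile_append_dropWhile] ; exact hl :
        c ∈ l.takeWhile PySem.Chars.isspace ++ l.dropWhile PySem.Chars.isspace) with h | h
    · exact absurd (List.mem_takeWhile_imp h) (by simp [hs])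
    · exact h
  have h1 : c ∈ List.dropWhile PySem.Chars.isspace p := step p hc
  have h2 : c ∈ List.dropWhile PySem.Chars.isspace (List.dropWhile PySem.Chars.isspace p).reverse :=
    step _ (by simpa using h1)
  simpa using h2

def pvIntCore (cs : List Char) : List Char :=
  (List.dropWhile PySem.Int.isIntSpace (List.dropWhile PySem.Int.isIntSpace cs).reverse).reverse

theorem pvOfChars_core {s t : List Char} (h : pvIntCore s = pvIntCore t) :
    PySem.Int.ofChars? s = PySem.Int.ofChars? t := by
  unfold pvIntCore at h
  simp only [PySem.Int.ofChars?]
  rw [h]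

theorem pv_core_sandwich (w1 d w2 : List Char) (hw1 : ∀ c ∈ w1, PySem.Int.isIntSpace c = true)
    (hw2 : ∀ c ∈ w2, PySem.Int.isIntSpace c = true) (hd : d ≠ [])
    (hdd : ∀ c ∈ d, PySem.Chars.isdigit c = true) :
    pvIntCore (w1 ++ d ++ w2) = d := by
  unfold pvIntCore
  exact pv_core_sandwich_gen _ w1 d w2 hw1 hw2 hd
    (fun c hc => pv_isdigit_not_intspace (hdd c hc))

theorem pv_mem_of_mem_core {c : Char} {cs : List Char} (h : c ∈ pvIntCore cs) : c ∈ cs := by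
  unfold pvIntCore at h
  have h1 : c ∈ (List.dropWhile PySem.Int.isIntSpace cs).reverse :=
    (List.dropWhile_sublist _).mem (List.mem_reverse.1 h)
  exact (List.dropWhile_sublist _).mem (List.mem_reverse.1 h1)

theorem pv_opt_nonneg (o : Option Nat) :
    0 ≤ (Option.map (fun n : Int => n) (do let a ← o; pure ((a : Nat) : Int))).getD 0 := by
  cases o <;> simp

-- value range of int(cs) when strip(cs) is a digit string
theorem pv_ofDigits_nonneg (cs : List Char)
    (h : (PySem.Chars.strip cs).all PySem.Chars.isdigit = true) :
    0 ≤ (PySem.Int.ofChars? cs).getD 0 := by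
  have hnotin : ∀ c : Char, PySem.Chars.isspace c = false → PySem.Chars.isdigit c = false →
      c ∉ pvIntCore cs := by
    intro c hsp hdig hmem
    have hc : c ∈ PySem.Chars.strip cs := pv_mem_strip (pv_mem_of_mem_core hmem) hsp
    have := (List.all_eq_true.1 h) c hc
    rw [hdig] at this
    exact Bool.false_ne_true this
  simp only [PySem.Int.ofChars?]
  split
  · next ds heq =>
    have hmem : '-' ∈ pvIntCore cs := by
      rw [show pvIntCore cs = '-' :: ds from heq]; simp
    exact absurd hmem (hnotin '-' (by decide) (by decide))
  · next ds heq =>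
    have hmem : '+' ∈ pvIntCore cs := by
      rw [show pvIntCore cs = '+' :: ds from heq]; simp
    exact absurd hmem (hnotin '+' (by decide) (by decide))
  · apply pv_opt_nonneg

theorem pv_dom_space_intspace {c : Char} (hdom : pvDomChar c = true)
    (hs : PySem.Chars.isspace c = true) : PySem.Int.isIntSpace c = true := by
  simp only [pvDomChar, Bool.or_eq_true, Bool.and_eq_true, decide_eq_true_eq, beq_iff_eq] at hdom
  simp only [PySem.Chars.isspace, Bool.or_eq_true, Bool.and_eq_true, decide_eq_true_eq] at hs
  have hn : c.toNat = 32 ∨ c.toNat = 9 ∨ c.toNat = 10 ∨ c.toNat = 13 := by omega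
  simp only [PySem.Int.isIntSpace, Bool.or_eq_true, decide_eq_true_eq]
  rcases hn with h | h | h | h
  · exact Or.inl (Or.inl (Or.inl (Or.inl (Or.inl (pv_char_of_toNat h ' ' rfl)))))
  · exact Or.inl (Or.inl (Or.inl (Or.inl (Or.inr (pv_char_of_toNat h '\t' rfl)))))
  · exact Or.inl (Or.inl (Or.inl (Or.inr (pv_char_of_toNat h '\n' rfl))))
  · exact Or.inl (Or.inl (Or.inr (pv_char_of_toNat h '\x0d' rfl)))


-- ---- appending one character to a stripped list ----
theorem pv_dropWhile_append_ne {q : Char → Bool} {p : List Char} (l : List Char)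
    (h : List.dropWhile q p ≠ []) :
    List.dropWhile q (p ++ l) = List.dropWhile q p ++ l := by
  induction p with
  | nil => exact absurd rfl h
  | cons a p ih =>
    by_cases ha : q a
    · rw [List.cons_append, List.dropWhile_cons_of_pos ha, List.dropWhile_cons_of_pos ha]
      exact ih (by rwa [List.dropWhile_cons_of_pos ha] at h)
    · rw [List.cons_append, List.dropWhile_cons_of_neg ha, List.dropWhile_cons_of_neg ha,
        List.cons_append]

theorem pv_dropWhile_append_single {q : Char → Bool} {c : Char} (p : List Char)
    (hc : q c = false) :
    List.dropWhile q (p ++ [c]) = List.dropWhile q p ++ [c] := by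
  by_cases h : List.dropWhile q p = []
  · have hall : ∀ x ∈ p, q x = true := by
      intro x hx
      exact List.dropWhile_eq_nil_iff.1 h x hx
    rw [pv_dropWhile_all hall, h, List.nil_append, pv_dropWhile_head_false hc]
  · exact pv_dropWhile_append_ne [c] h

theorem pv_strip_append_nonws {c : Char} (p : List Char)
    (hc : PySem.Chars.isspace c = false) :
    PySem.Chars.strip (p ++ [c]) = PySem.Chars.lstrip p ++ [c] := by
  unfold PySem.Chars.strip PySem.Chars.rstrip PySem.Chars.lstrip
  rw [show List.dropWhile PySem.Chars.isspace (p ++ [c])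
        = List.dropWhile PySem.Chars.isspace p ++ [c] from pv_dropWhile_append_single p hc]
  rw [List.reverse_append]
  simp only [List.reverse_cons, List.reverse_nil, List.nil_append, List.singleton_append]
  rw [pv_dropWhile_head_false hc]
  simp

theorem pv_lstrip_ne_of_strip_ne {p : List Char} (h : PySem.Chars.strip p ≠ []) :
    PySem.Chars.lstrip p ≠ [] := by
  intro he
  apply h
  unfold PySem.Chars.strip PySem.Chars.rstrip
  rw [he]
  rfl

theorem pv_strip_append_ws {c : Char} {p : List Char}
    (hc : PySem.Chars.isspace c = true) (hp : PySem.Chars.strip p ≠ []) :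
    PySem.Chars.strip (p ++ [c]) = PySem.Chars.strip p := by
  unfold PySem.Chars.strip PySem.Chars.rstrip PySem.Chars.lstrip
  rw [show List.dropWhile PySem.Chars.isspace (p ++ [c])
        = List.dropWhile PySem.Chars.isspace p ++ [c] from
      pv_dropWhile_append_ne [c] (fun he => pv_lstrip_ne_of_strip_ne hp he)]
  rw [List.reverse_append]
  simp only [List.reverse_cons, List.reverse_nil, List.nil_append, List.singleton_append]
  rw [List.dropWhile_cons_of_pos hc]

theorem pv_mem_rstrip_rev {x : Char} {z : List Char}
    (h : x ∈ (List.dropWhile PySem.Chars.isspace z.reverse).reverse) : x ∈ z := by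
  have := (List.dropWhile_sublist _).mem (List.mem_reverse.1 h)
  exact List.mem_reverse.1 this

-- ---- the DFA invariant holds for every prefix ----
theorem pvInv3_holds (p : List Char) : pvInv3 p := by
  induction p using List.reverseRecOn with
  | nil =>
    unfold pvInv3 pvRun3 pvGood
    simp only [List.foldl_nil]
    refine ⟨[], [], by simp, by simp, by simp, by simp, by simp, by simp⟩
  | append_singleton p c ih =>
    have hrun : pvRun3 (p ++ [c]) = pvStep3 (pvRun3 p) c := by
      unfold pvRun3
      rw [List.foldl_append, List.foldl_cons, List.foldl_nil]
    rcases hr : pvRun3 p with ⟨d, g, b⟩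
    unfold pvInv3 at ih ⊢
    rw [hr] at ih
    rw [hrun, hr]
    cases b with
    | true =>
      simp only [reduceIte] at ih
      obtain ⟨hs1, hs2⟩ := ih
      obtain ⟨x, hx, hxd⟩ : ∃ x ∈ PySem.Chars.strip p, PySem.Chars.isdigit x = false := by
        rcases List.all_eq_false.mp hs2 with ⟨x, hx, hxd⟩
        exact ⟨x, hx, by simpa using hxd⟩
      have hb' : (pvStep3 (d, g, true) c).2.2 = true := by
        unfold pvStep3
        split
        · split <;> rfl
        · split
          · split <;> rfl
          · rfl
      rw [if_pos hb']
      by_cases hc : PySem.Chars.isspace c = true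
      · rw [pv_strip_append_ws hc hs1]
        exact ⟨hs1, hs2⟩
      · rw [pv_strip_append_nonws p (by simpa using hc)]
        constructor
        · simp
        · have hxl : x ∈ PySem.Chars.lstrip p := by
            have : x ∈ (List.dropWhile PySem.Chars.isspace
                (PySem.Chars.lstrip p).reverse).reverse := hx
            exact pv_mem_rstrip_rev this
          apply List.all_eq_false.mpr
          exact ⟨x, by simp [hxl], by simp [hxd]⟩
    | false =>
      have ih' : pvGood p d g := by
        simpa using ih
      obtain ⟨w1, w2, hp, hw1, hw2, hdd, hd0, hg⟩ := ih'
      have hlstrip : d ≠ [] → PySem.Chars.lstrip p = d ++ w2 := by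
        intro hde
        obtain ⟨y, d', rfl⟩ := List.exists_cons_of_ne_nil hde
        unfold PySem.Chars.lstrip
        rw [hp, List.append_assoc, pv_dropWhile_all hw1, List.cons_append,
          pv_dropWhile_head_false (pv_isdigit_not_isspace (hdd y (by simp)))]
      by_cases hcs : PySem.Chars.isspace c = true
      · -- whitespace character
        by_cases hde : d = []
        · have hw2e : w2 = [] := hd0 hde
          have hstep : pvStep3 (d, g, false) c = (d, g, false) := by
            simp [pvStep3, hcs, hde]
          rw [hstep]
          rw [if_neg (by simp)]
          subst hde hw2e
          refine ⟨w1 ++ [c], [], by simpa using hp, ?_, by simp, by simp, fun _ => rfl,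
            by simpa using hg⟩
          intro x hx
          rcases List.mem_append.1 hx with h | h
          · exact hw1 x h
          · simp at h; subst h; exact hcs
        · have hstep : pvStep3 (d, g, false) c = (d, true, false) := by
            simp [pvStep3, hcs, hde]
          rw [hstep]
          rw [if_neg (by simp)]
          refine ⟨w1, w2 ++ [c], by rw [hp]; simp, hw1, ?_, hdd, by simp [hde], by simp [hde]⟩
          intro x hx
          rcases List.mem_append.1 hx with h | h
          · exact hw2 x h
          · simp at h; subst h; exact hcs
      · -- non-whitespace character
        have hcs' : PySem.Chars.isspace c = false := by simpa using hcs
        have hbadcase : ∀ x : Char, PySem.Chars.isdigit x = false →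
            x ∈ PySem.Chars.lstrip p ++ [c] →
            (PySem.Chars.strip (p ++ [c]) ≠ [] ∧
              (PySem.Chars.strip (p ++ [c])).all PySem.Chars.isdigit = false) := by
          intro x hx hmem
          rw [pv_strip_append_nonws p hcs']
          exact ⟨by simp, List.all_eq_false.mpr ⟨x, hmem, by simp [hx]⟩⟩
        by_cases hcd : PySem.Chars.isdigit c = true
        · have hcd' : '0' ≤ c ∧ c ≤ '9' := by
            simpa [PySem.Chars.isdigit] using hcd
          cases g with
          | true =>
            obtain ⟨hdne, hw2ne⟩ := hg.mp rfl
            have hstep : pvStep3 (d, true, false) c = (d, true, true) := by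
              simp [pvStep3, hcs', hcd']
            rw [hstep]
            rw [if_pos rfl]
            obtain ⟨y, w2', rfl⟩ := List.exists_cons_of_ne_nil hw2ne
            have hyd : PySem.Chars.isdigit y = false := by
              by_contra hyd
              have := pv_isdigit_not_isspace
                (by simpa using hyd : PySem.Chars.isdigit y = true)
              rw [hw2 y (by simp)] at this
              simp at this
            exact hbadcase y hyd (by rw [hlstrip hdne]; simp)
          | false =>
            have hw2e : w2 = [] := by
              have h : ¬(d ≠ [] ∧ w2 ≠ []) := fun hcontra => by
                have := hg.mpr hcontra
                simp at this
              by_cases hde : d = []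
              · exact hd0 hde
              · by_cases hw2' : w2 = []
                · exact hw2'
                · exact absurd ⟨hde, hw2'⟩ h
            subst hw2e
            have hstep : pvStep3 (d, false, false) c = (d ++ [c], false, false) := by
              simp [pvStep3, hcs', hcd']
            rw [hstep]
            rw [if_neg (by simp)]
            refine ⟨w1, [], by rw [hp]; simp, hw1, by simp, ?_, fun _ => rfl, by simp⟩
            intro x hx
            rcases List.mem_append.1 hx with h | h
            · exact hdd x h
            · simp at h; subst h; exact hcd
        · have hcd'' : ¬('0' ≤ c ∧ c ≤ '9') := by
            intro hcontra
            exact absurd (by simpa [PySem.Chars.isdigit] using hcontra :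
              PySem.Chars.isdigit c = true) (by simp [hcd])
          have hstep : pvStep3 (d, g, false) c = (d, g, true) := by
            simp [pvStep3, hcs', hcd'']
          rw [hstep]
          rw [if_pos rfl]
          exact hbadcase c (by simpa using hcd) (by simp)

theorem pvParseVote_cases (cs : List Char) :
    pvParseVote cs = -1 ∨ pvParseVote cs = 0 ∨ 0 < pvParseVote cs := by
  unfold pvParseVote
  by_cases h1 : PySem.Chars.strIsdigit (PySem.Chars.strip cs) = true
  · rw [if_pos h1]
    have hall : (PySem.Chars.strip cs).all PySem.Chars.isdigit = true := by
      simp only [PySem.Chars.strIsdigit, Bool.and_eq_true] at h1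
      exact h1.2
    have hnn := pv_ofDigits_nonneg cs hall
    rcases lt_or_eq_of_le hnn with h | h
    · exact Or.inr (Or.inr h)
    · exact Or.inr (Or.inl h.symm)
  · rw [if_neg h1]
    by_cases h2 : PySem.Chars.strip cs = []
    · rw [if_pos h2]; exact Or.inr (Or.inl rfl)
    · rw [if_neg h2]; exact Or.inl rfl

-- ---- the field flush equals parseVote ----
theorem pvFlush_eq_parseVote (v : List Int) (sb sp : Bool) (p : List Char)
    (hdom : ∀ c ∈ p, pvDomChar c = true) :
    pvFlush ⟨v, sb, sp, (pvRun3 p).1, (pvRun3 p).2.1, (pvRun3 p).2.2⟩ = pvParseVote p := by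
  have hinv := pvInv3_holds p
  unfold pvInv3 at hinv
  rcases hr : pvRun3 p with ⟨d, g, b⟩
  rw [hr] at hinv
  cases b with
  | true =>
    simp only [reduceIte] at hinv
    obtain ⟨hs1, hs2⟩ := hinv
    have hdig : PySem.Chars.strIsdigit (PySem.Chars.strip p) = false := by
      simp [PySem.Chars.strIsdigit, hs2]
    simp [pvFlush, pvParseVote, hdig, hs1]
  | false =>
    have hgood : pvGood p d g := by simpa using hinv
    obtain ⟨w1, w2, hp, hw1, hw2, hdd, hd0, hg⟩ := hgood
    by_cases hde : d = []
    · subst hde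
      have hw2e : w2 = [] := hd0 rfl
      subst hw2e
      have hstrip : PySem.Chars.strip p = [] := by
        rw [hp]
        exact pv_strip_all_space _ (by simpa using hw1)
      simp [pvFlush, pvParseVote, hstrip, PySem.Chars.strIsdigit]
    · have hstrip : PySem.Chars.strip p = d := by
        rw [hp]
        exact pv_strip_sandwich w1 d w2 hw1 hw2 hde hdd
      have hdig : PySem.Chars.strIsdigit (PySem.Chars.strip p) = true := by
        simp [PySem.Chars.strIsdigit, hstrip, hde, List.all_eq_true.2 hdd]
      have hcorep : pvIntCore p = d := by
        rw [hp]
        refine pv_core_sandwich w1 d w2 ?_ ?_ hde hdd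
        · intro x hx
          exact pv_dom_space_intspace (hdom x (by rw [hp]; simp [hx])) (hw1 x hx)
        · intro x hx
          exact pv_dom_space_intspace (hdom x (by rw [hp]; simp [hx])) (hw2 x hx)
      have hcored : pvIntCore d = d := by
        have := pv_core_sandwich [] d [] (by simp) (by simp) hde hdd
        simpa using this
      have hof : PySem.Int.ofChars? p = PySem.Int.ofChars? d :=
        pvOfChars_core (by rw [hcorep, hcored])
      simp [pvFlush, pvParseVote, hdig, hde, hof]

-- ---- the main loop lemma: the DFA over cs ++ [','] produces the mapped token list ----
def pvConsHead (p : List Char) : List (List Char) → List (List Char)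
  | [] => [p]
  | t :: ts => (p ++ t) :: ts

theorem pvMain : ∀ (cs p : List Char) (votes : List Int) (sb sp : Bool),
    (∀ c ∈ p, pvDomChar c = true) → (∀ c ∈ cs, pvDomChar c = true) → ',' ∉ p →
    (cs ++ [',']).foldl pvStepB ⟨votes, sb, sp, (pvRun3 p).1, (pvRun3 p).2.1, (pvRun3 p).2.2⟩ =
      ⟨votes ++ (pvConsHead p (pvSplit cs)).map pvParseVote,
       sb || ((pvConsHead p (pvSplit cs)).map pvParseVote).any (· == -1),
       sp || ((pvConsHead p (pvSplit cs)).map pvParseVote).any (fun x => decide (0 < x)),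
       [], false, false⟩ := by
  intro cs
  induction cs with
  | nil =>
    intro p votes sb sp hdp hdc hpc
    simp only [List.nil_append, List.foldl_cons, List.foldl_nil]
    have hcomma : pvStepB ⟨votes, sb, sp, (pvRun3 p).1, (pvRun3 p).2.1, (pvRun3 p).2.2⟩ ',' =
        ⟨votes ++ [pvParseVote p], sb || (pvParseVote p == -1),
         sp || decide (0 < pvParseVote p), [], false, false⟩ := by
      have hv := pvFlush_eq_parseVote votes sb sp p hdp
      simp only [pvStepB, reduceIte, hv]
    rw [hcomma]
    simp [pvSplit, pvConsHead]
  | cons c cs ih =>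
    intro p votes sb sp hdp hdc hpc
    simp only [List.cons_append, List.foldl_cons]
    have hdc' : ∀ x ∈ cs, pvDomChar x = true := fun x hx => hdc x (by simp [hx])
    by_cases hc : c = ','
    · subst hc
      have hcomma : pvStepB ⟨votes, sb, sp, (pvRun3 p).1, (pvRun3 p).2.1, (pvRun3 p).2.2⟩ ',' =
          ⟨votes ++ [pvParseVote p], sb || (pvParseVote p == -1),
           sp || decide (0 < pvParseVote p), [], false, false⟩ := by
        have hv := pvFlush_eq_parseVote votes sb sp p hdp
        simp only [pvStepB, reduceIte, hv]
      rw [hcomma]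
      have h0 : (pvRun3 []) = ([], false, false) := rfl
      have := ih [] (votes ++ [pvParseVote p]) (sb || (pvParseVote p == -1))
        (sp || decide (0 < pvParseVote p)) (by simp) hdc' (by simp)
      rw [h0] at this
      rw [this]
      rcases hr : pvSplit cs with _ | ⟨t, ts⟩
      · exact absurd hr (pvSplit_ne_nil cs)
      · simp [pvSplit, pvConsHead, hr, Bool.or_assoc, List.any_cons]
    · have hrun : (pvRun3 (p ++ [c])) = pvStep3 (pvRun3 p) c := by
        unfold pvRun3
        rw [List.foldl_append, List.foldl_cons, List.foldl_nil]
      have hstep := pvStepB_non_comma votes sb sp (pvRun3 p).1 (pvRun3 p).2.1 (pvRun3 p).2.2 c hc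
      rw [show ((pvRun3 p).1, (pvRun3 p).2.1, (pvRun3 p).2.2) = pvRun3 p by rfl] at hstep
      rw [hstep, ← hrun]
      have := ih (p ++ [c]) votes sb sp
        (by
          intro x hx
          rcases List.mem_append.1 hx with h | h
          · exact hdp x h
          · simp at h; subst h; exact hdc x (by simp))
        hdc'
        (by
          intro hmem
          rcases List.mem_append.1 hmem with h | h
          · exact hpc h
          · simp at h; exact hc h.symm)
      rw [this]
      rcases hr : pvSplit cs with _ | ⟨t, ts⟩
      · exact absurd hr (pvSplit_ne_nil cs)
      · simp [pvSplit, pvConsHead, hr, hc]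

-- ---- A-side: the validation loop invariant (state after processing the prefix p of P) ----
def pvInv (P p : List Int) : List Int × String × Int :=
  if (-1 : Int) ∈ p then ([], "non-digits", ((p.countP (· == 0) : Nat) : Int))
  else if p = P ∧ p ≠ [] ∧ ∀ x ∈ p, x = 0 then ([], "blank", ((p.countP (· == 0) : Nat) : Int))
  else (P, "", ((p.countP (· == 0) : Nat) : Int))

theorem pvLoopA_inv (P : List Int) : ∀ (r p : List Int), p ++ r = P →
    r.foldl pvLoopA (pvInv P p) = pvInv P P := by
  intro r
  induction r with
  | nil => intro p hp; simp at hp; simp [hp]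
  | cons e r' ih =>
    intro p hp
    have hstep : pvLoopA (pvInv P p) e = pvInv P (p ++ [e]) := by
      by_cases hm : (-1 : Int) ∈ p
      · have hm' : (-1 : Int) ∈ p ++ [e] := List.mem_append.2 (Or.inl hm)
        have hstate : pvInv P p = ([], "non-digits", ((p.countP (· == 0) : Nat) : Int)) := by
          simp [pvInv, hm]
        rw [hstate]
        by_cases he0 : e = 0
        · subst he0
          have hR : pvInv P (p ++ [(0 : Int)])
              = ([], "non-digits", ((p.countP (· == 0) : Nat) : Int) + 1) := by
            simp [pvInv, hm', List.countP_append]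
          rw [hR]
          have hne0 : ¬(((p.countP (· == 0) : Nat) : Int) + 1 = (0 : Int)) := by omega
          simp [pvLoopA, hne0]
        · have hR : pvInv P (p ++ [e])
              = ([], "non-digits", ((p.countP (· == 0) : Nat) : Int)) := by
            simp [pvInv, hm', he0, List.countP_append]
          rw [hR]
          simp [pvLoopA, he0]
      · have hne : p ≠ P := by
          intro h; subst h
          have := congrArg List.length hp; simp at this
        have hstate : pvInv P p = (P, "", ((p.countP (· == 0) : Nat) : Int)) := by
          simp [pvInv, hm, hne]
        rw [hstate]
        by_cases he : e = (-1 : Int)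
        · subst he
          have hm' : (-1 : Int) ∈ p ++ [(-1 : Int)] := by simp
          have hR : pvInv P (p ++ [(-1 : Int)])
              = ([], "non-digits", ((p.countP (· == 0) : Nat) : Int)) := by
            simp [pvInv, hm', List.countP_append]
          rw [hR]
          simp [pvLoopA]
        · have hm' : (-1 : Int) ∉ p ++ [e] := by
            simp [hm]
            omega
          by_cases he0 : e = 0
          · subst he0
            have hlen : P.length = p.length + (r'.length + 1) := by
              have := congrArg List.length hp; simpa using this.symm
            have hcle : p.countP (· == 0) ≤ p.length := List.countP_le_length
            by_cases hall : (∀ x ∈ p, x = 0) ∧ r' = []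
            · obtain ⟨hall0, hr'⟩ := hall
              subst hr'
              simp only [List.length_nil] at hlen
              have hcnt : p.countP (· == 0) = p.length := by
                rw [List.countP_eq_length]; intro a ha; simpa using hall0 a ha
              have hPeq : p ++ [(0 : Int)] = P := by simpa using hp
              have hcond : ((p.countP (· == 0) : Nat) : Int) + 1 = (P.length : Int) := by
                rw [hcnt]; omega
              have hAll : ∀ x ∈ p ++ [(0 : Int)], x = 0 := by
                intro x hx; rcases List.mem_append.1 hx with h | h
                · exact hall0 x h
                · simpa using h
              have hc2 : p ++ [(0 : Int)] = P ∧ p ++ [(0 : Int)] ≠ [] ∧ ∀ x ∈ p ++ [(0 : Int)], x = 0 :=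
                ⟨hPeq, by simp, hAll⟩
              have hR : pvInv P (p ++ [(0 : Int)])
                  = ([], "blank", ((p.countP (· == 0) : Nat) : Int) + 1) := by
                simp only [pvInv, if_neg hm', if_pos hc2]
                simp [List.countP_append]
              rw [hR]
              simp [pvLoopA, hcond]
            · have hneq : ¬(((p.countP (· == 0) : Nat) : Int) + 1 = (P.length : Int)) := by
                rcases not_and_or.1 hall with h | h
                · have hlt : p.countP (· == 0) < p.length :=
                    lt_of_le_of_ne hcle (fun heq => h (fun a ha => by
                      simpa using (List.countP_eq_length.1 heq) a ha))
                  omega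
                · have h1 : 0 < r'.length := List.length_pos_iff.2 h
                  omega
              have hc2 : ¬(p ++ [(0 : Int)] = P ∧ p ++ [(0 : Int)] ≠ [] ∧ ∀ x ∈ p ++ [(0 : Int)], x = 0) := by
                rintro ⟨hPe, -, hall0⟩
                apply hneq
                have hcnt : p.countP (· == 0) = p.length := by
                  rw [List.countP_eq_length]; intro a ha
                  simpa using hall0 a (List.mem_append.2 (Or.inl ha))
                have hl := congrArg List.length hPe
                simp at hl
                rw [hcnt]; omega
              have hR : pvInv P (p ++ [(0 : Int)])
                  = (P, "", ((p.countP (· == 0) : Nat) : Int) + 1) := by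
                simp only [pvInv, if_neg hm', if_neg hc2]
                simp [List.countP_append]
              rw [hR]
              simp [pvLoopA, hneq]
          · have hc2 : ¬(p ++ [e] = P ∧ p ++ [e] ≠ [] ∧ ∀ x ∈ p ++ [e], x = 0) := by
              rintro ⟨-, -, hall0⟩; exact he0 (hall0 e (by simp))
            have hR : pvInv P (p ++ [e]) = (P, "", ((p.countP (· == 0) : Nat) : Int)) := by
              simp only [pvInv, if_neg hm', if_neg hc2]
              simp [List.countP_append, he0]
            rw [hR]
            simp [pvLoopA, he, he0]
    rw [List.foldl_cons, hstep]
    exact ih (p ++ [e]) (by simpa using hp)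

theorem pvLoopA_run (P : List Int) :
    P.foldl pvLoopA (P, "", 0) = pvInv P P := by
  have h0 : pvInv P ([] : List Int) = (P, "", 0) := by simp [pvInv]
  rw [← h0]
  exact pvLoopA_inv P P [] (by simp)

-- ===== VERDICT (by name: the statement is the Claim_ definition above) =====
theorem parsePaper_spec : Claim_equal_parsePaper := by
  intro s n hdom
  have hdomc : ∀ c ∈ s.toList, pvDomChar c = true := by
    unfold Dom_parsePaper pvDomStr at hdom
    simp only [Bool.and_eq_true] at hdom
    exact fun c hc => (List.all_eq_true.1 hdom.1) c hc
  unfold Spec_parsePaper parsePaper parsePaper_alt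
  rw [pvSplitOn_eq]
  have hmain := pvMain s.toList [] [] false false (by simp) hdomc (by simp)
  have hch : pvConsHead [] (pvSplit s.toList) = pvSplit s.toList := by
    rcases hr : pvSplit s.toList with _ | ⟨t, ts⟩
    · exact absurd hr (pvSplit_ne_nil _)
    · simp [pvConsHead]
  rw [hch] at hmain
  have hmain' : (s.toList ++ [',']).foldl pvStepB ⟨[], false, false, [], false, false⟩ =
      ⟨(pvSplit s.toList).map pvParseVote,
       ((pvSplit s.toList).map pvParseVote).any (· == -1),
       ((pvSplit s.toList).map pvParseVote).any (fun x => decide (0 < x)),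
       [], false, false⟩ := by
    have h0 : pvRun3 [] = ([], false, false) := rfl
    rw [h0] at hmain
    simpa using hmain
  rw [hmain']
  set P := (pvSplit s.toList).map pvParseVote with hP
  have hPlen : (P.length : Int) = ((pvSplit s.toList).length : Int) := by
    simp [hP]
  have hPne : P ≠ [] := by
    simp only [hP, ne_eq, List.map_eq_nil_iff]
    exact pvSplit_ne_nil _
  by_cases hlong : ((pvSplit s.toList).length : Int) > n
  · rw [if_pos hlong, if_pos (by rw [hPlen]; exact hlong)]
  · rw [if_neg hlong, if_neg (by rw [hPlen]; exact hlong)]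
    have hfold : (pvSplit s.toList).foldl (fun acc item => acc ++ [pvParseVote item]) [] = P := by
      simpa using PySem.List.foldl_append_singleton_eq_map pvParseVote (pvSplit s.toList) []
    simp only [hfold]
    rw [pvLoopA_run P]
    by_cases hm : (-1 : Int) ∈ P
    · have hany : P.any (· == -1) = true :=
        List.any_eq_true.2 ⟨-1, hm, by simp⟩
      simp [pvInv, hm, hany]
    · have hany : P.any (· == -1) = false := by
        apply List.any_eq_false.2
        intro x hx
        simp only [beq_iff_eq]
        intro hxe
        exact hm (hxe ▸ hx)
      by_cases hb : ∀ x ∈ P, x = 0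
      · have hnp : P.any (fun x => decide (0 < x)) = false := by
          apply List.any_eq_false.2
          intro x hx
          simp [hb x hx]
        have hc : True ∧ P ≠ [] ∧ ∀ x ∈ P, x = 0 := ⟨trivial, hPne, hb⟩
        simp only [pvInv, if_neg hm]
        rw [if_pos hc]
        simp [hany, hnp]
      · obtain ⟨x, hx, hx0⟩ : ∃ x ∈ P, x ≠ 0 := by
          simpa using hb
        have hxv : 0 < x := by
          obtain ⟨cs, -, hcs⟩ := List.mem_map.1 (hP ▸ hx)
          rcases pvParseVote_cases cs with h | h | h
          · exact absurd (by rw [← hcs, h] at hx; exact hx : (-1 : Int) ∈ P) hm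
          · exact absurd (by rw [← hcs]; exact h : x = 0) hx0
          · rw [← hcs]; exact h
        have hnp : P.any (fun x => decide (0 < x)) = true :=
          List.any_eq_true.2 ⟨x, hx, by simp [hxv]⟩
        have hc : ¬(True ∧ P ≠ [] ∧ ∀ x ∈ P, x = 0) := by
          rintro ⟨-, -, hall⟩
          exact hx0 (hall x hx)
        simp only [pvInv, if_neg hm]
        rw [if_neg hc]
        simp [hany, hnp]
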